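-- pv_equiv track=rewrite | github.com/posl/comment_recommendation | script/split_gen/2_time/zh/165_C/7.py | get_score
-- ===== SOURCE A (Python) =====
-- def get_score(n, m, q, a, b, c, d):
--     score = 0
--     for i in range(1, n+1):
--         for j in range(1, m+1):
--             for k in range(1, q+1):
--                 if a[k] == i and b[k] == j:
--                     score += d[k]
--     return score
-- ===== SOURCE B (Python) =====
-- def get_score(n, m, q, a, b, c, d):
--     k = max(q, 0)
--     triples = zip(a[1:k + 1], b[1:k + 1], d[1:k + 1])
--     return sum(dk for ak, bk, dk in triples if 1 <= ak <= n and 1 <= bk <= m)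
-- ===== Notes on version B (the rewrite author's own statement) =====
-- stated objective: faster
-- what changed: Replaced the triple nested loop over every grid cell (i,j) and every query k by slicing the three query lists to a[1:q+1], b[1:q+1], d[1:q+1], zipping them and summing d over the triples whose point lies inside the n-by-m grid.
-- outside the precondition, e.g. on get_score(1, 1, 1, [0, 2], [0, 2], [], []): A returns 0, B returns 0
import Mathlib
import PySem

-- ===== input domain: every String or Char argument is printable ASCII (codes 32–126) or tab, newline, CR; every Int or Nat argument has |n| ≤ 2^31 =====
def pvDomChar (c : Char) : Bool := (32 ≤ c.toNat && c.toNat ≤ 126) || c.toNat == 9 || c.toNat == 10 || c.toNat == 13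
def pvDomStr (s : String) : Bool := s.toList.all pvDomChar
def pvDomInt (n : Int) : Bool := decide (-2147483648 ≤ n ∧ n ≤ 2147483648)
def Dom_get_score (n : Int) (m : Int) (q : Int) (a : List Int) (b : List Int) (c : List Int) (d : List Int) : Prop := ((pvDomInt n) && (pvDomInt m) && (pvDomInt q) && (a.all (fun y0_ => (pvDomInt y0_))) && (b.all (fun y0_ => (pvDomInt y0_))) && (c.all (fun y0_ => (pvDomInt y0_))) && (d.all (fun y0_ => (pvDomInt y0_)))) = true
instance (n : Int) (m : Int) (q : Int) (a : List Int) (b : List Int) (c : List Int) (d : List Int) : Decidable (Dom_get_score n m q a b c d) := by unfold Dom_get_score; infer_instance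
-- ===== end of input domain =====

-- B replaces A's triple nested loop over grid cells and queries by slicing the
-- query lists to positions 1..q, zipping them, and summing d over the triples
-- inside the n-by-m grid; faster (O(q) instead of O(n*m*q)).

-- ===== PORT A =====
def get_score (n : Int) (m : Int) (q : Int) (a : List Int) (b : List Int) (c : List Int) (d : List Int) : Int :=
  (PySem.List.pyRange 1 (n+1) 1).foldl (fun score i =>
    (PySem.List.pyRange 1 (m+1) 1).foldl (fun score j =>
      (PySem.List.pyRange 1 (q+1) 1).foldl (fun score k =>
        if PySem.List.pyGetD a k 0 = i ∧ PySem.List.pyGetD b k 0 = j then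
          score + PySem.List.pyGetD d k 0
        else score) score) score) 0

-- ===== PORT B =====
def get_score_alt (n : Int) (m : Int) (q : Int) (a : List Int) (b : List Int) (c : List Int) (d : List Int) : Int :=
  let k := max q 0
  let triples := (PySem.List.slice a (some 1) (some (k+1))).zip
    ((PySem.List.slice b (some 1) (some (k+1))).zip
      (PySem.List.slice d (some 1) (some (k+1))))
  ((triples.filter (fun t =>
      decide (1 ≤ t.1 ∧ t.1 ≤ n ∧ 1 ≤ t.2.1 ∧ t.2.1 ≤ m))).map (fun t => t.2.2)).sum

-- ===== PRECONDITION & SPEC =====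
-- Pre_ excludes inputs with q ≥ 1, n ≥ 1, m ≥ 1 where some of a, b, d is shorter than
-- q+1: there the Python A in general raises IndexError; on the sliver of those where A
-- still returns (d too short but no query ever matches a grid cell) A returns 0 and B
-- returns 0 as well.
def Pre_get_score (n : Int) (m : Int) (q : Int) (a : List Int) (b : List Int) (c : List Int) (d : List Int) : Prop :=
  (1 ≤ q ∧ 1 ≤ n ∧ 1 ≤ m) → (q < (a.length : Int) ∧ q < (b.length : Int) ∧ q < (d.length : Int))
instance (n : Int) (m : Int) (q : Int) (a : List Int) (b : List Int) (c : List Int) (d : List Int) : Decidable (Pre_get_score n m q a b c d) := by unfold Pre_get_score; infer_instance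

def pvWitness_get_score : Int × Int × Int × List Int × List Int × List Int × List Int :=
  (2, 2, 2, [0, 1, 2], [0, 2, 1], [], [0, 5, 7])

def Spec_get_score (n : Int) (m : Int) (q : Int) (a : List Int) (b : List Int) (c : List Int) (d : List Int) (out : Int) : Prop := out = get_score_alt n m q a b c d
instance (n : Int) (m : Int) (q : Int) (a : List Int) (b : List Int) (c : List Int) (d : List Int) (out : Int) : Decidable (Spec_get_score n m q a b c d out) := by unfold Spec_get_score; infer_instance

-- ===== CLAIM (what is proved, stated in full; the proofs are below) =====
def Claim_equal_get_score : Prop := ∀ (n : Int) (m : Int) (q : Int) (a : List Int) (b : List Int) (c : List Int) (d : List Int), Dom_get_score n m q a b c d → Pre_get_score n m q a b c d → Spec_get_score n m q a b c d (get_score n m q a b c d)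

-- ===== LEMMAS AND PROOFS =====

-- turn 'if P then s + x else s' into 's + (if P then x else 0)'
theorem pv_ite_add (P : Prop) [Decidable P] (s x : Int) :
    (if P then s + x else s) = s + (if P then x else 0) := by
  split_ifs <;> simp

-- Σ over a Nodup list of 'if x = i then c else 0' is a membership test
theorem pv_sum_ite_eq_mem (x c : Int) (l : List Int) (hl : l.Nodup) :
    (l.map (fun i => if x = i then c else 0)).sum = if x ∈ l then c else 0 := by
  induction l with
  | nil => simp
  | cons h t ih =>
    simp only [List.map_cons, List.sum_cons, List.mem_cons]
    rcases List.nodup_cons.mp hl with ⟨hht, ht⟩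
    rw [ih ht]
    by_cases hx : x = h
    · subst hx
      simp [hht]
    · simp [hx]

-- swap a double list sum (Int)
theorem pv_sum_swap (I K : List Int) (f : Int → Int → Int) :
    (I.map (fun i => (K.map (f i)).sum)).sum
      = (K.map (fun k => (I.map (fun i => f i k)).sum)).sum := by
  induction I with
  | nil => simp
  | cons h t ih =>
    simp only [List.map_cons, List.sum_cons, ih]
    rw [← List.sum_map_add]

-- the inner grid double-sum for one query collapses to a bounds test
theorem pv_grid_collapse (n m ak bk dk : Int) :
    ((PySem.List.pyRange 1 (n+1) 1).map (fun i =>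
      ((PySem.List.pyRange 1 (m+1) 1).map (fun j =>
        if ak = i ∧ bk = j then dk else 0)).sum)).sum
    = if 1 ≤ ak ∧ ak ≤ n ∧ 1 ≤ bk ∧ bk ≤ m then dk else 0 := by
  have hJ : ((PySem.List.pyRange 1 (m+1) 1).map (fun j => if bk = j then dk else 0)).sum
      = if bk ∈ PySem.List.pyRange 1 (m+1) 1 then dk else 0 :=
    pv_sum_ite_eq_mem _ _ _ (PySem.List.nodup_pyRange_one 1 (m+1))
  have hstep : ∀ i : Int,
      ((PySem.List.pyRange 1 (m+1) 1).map (fun j => if ak = i ∧ bk = j then dk else 0)).sum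
      = if ak = i then (if bk ∈ PySem.List.pyRange 1 (m+1) 1 then dk else 0) else 0 := by
    intro i
    by_cases hi : ak = i
    · subst hi
      simpa using hJ
    · simp [hi]
  calc ((PySem.List.pyRange 1 (n+1) 1).map (fun i =>
          ((PySem.List.pyRange 1 (m+1) 1).map (fun j =>
            if ak = i ∧ bk = j then dk else 0)).sum)).sum
      = ((PySem.List.pyRange 1 (n+1) 1).map (fun i =>
          if ak = i then (if bk ∈ PySem.List.pyRange 1 (m+1) 1 then dk else 0) else 0)).sum := by
        exact congrArg List.sum (List.map_congr_left (fun i _ => hstep i))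
    _ = if ak ∈ PySem.List.pyRange 1 (n+1) 1 then
          (if bk ∈ PySem.List.pyRange 1 (m+1) 1 then dk else 0) else 0 :=
        pv_sum_ite_eq_mem _ _ _ (PySem.List.nodup_pyRange_one 1 (n+1))
    _ = if 1 ≤ ak ∧ ak ≤ n ∧ 1 ≤ bk ∧ bk ≤ m then dk else 0 := by
        simp only [PySem.List.mem_pyRange_one]
        split_ifs <;> first | rfl | omega

-- A equals the single indexed sum over the queries with a bounds test
theorem pv_A_eq_sum (n m q : Int) (a b c d : List Int) :
    get_score n m q a b c d
      = ((PySem.List.pyRange 1 (q+1) 1).map (fun k =>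
          if 1 ≤ PySem.List.pyGetD a k 0 ∧ PySem.List.pyGetD a k 0 ≤ n ∧
             1 ≤ PySem.List.pyGetD b k 0 ∧ PySem.List.pyGetD b k 0 ≤ m then
            PySem.List.pyGetD d k 0 else 0)).sum := by
  unfold get_score
  simp only [pv_ite_add, PySem.List.foldl_add, Int.zero_add]
  rw [show ((PySem.List.pyRange 1 (n+1) 1).map (fun i =>
        ((PySem.List.pyRange 1 (m+1) 1).map (fun j =>
          ((PySem.List.pyRange 1 (q+1) 1).map (fun k =>
            if PySem.List.pyGetD a k 0 = i ∧ PySem.List.pyGetD b k 0 = j then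
              PySem.List.pyGetD d k 0 else 0)).sum)).sum)).sum
      = ((PySem.List.pyRange 1 (n+1) 1).map (fun i =>
          ((PySem.List.pyRange 1 (q+1) 1).map (fun k =>
            ((PySem.List.pyRange 1 (m+1) 1).map (fun j =>
              if PySem.List.pyGetD a k 0 = i ∧ PySem.List.pyGetD b k 0 = j then
                PySem.List.pyGetD d k 0 else 0)).sum)).sum)).sum from
      congrArg List.sum (List.map_congr_left (fun i _ => pv_sum_swap _ _ _))]
  rw [pv_sum_swap]
  exact congrArg List.sum (List.map_congr_left (fun k _ => pv_grid_collapse n m _ _ _))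

-- summing a projection over a filtered list = summing the guarded projection
theorem pv_sum_filter_map (l : List (Int × Int × Int)) (p : Int × Int × Int → Bool) :
    ((l.filter p).map (fun t => t.2.2)).sum
      = (l.map (fun t => if p t then t.2.2 else 0)).sum := by
  induction l with
  | nil => simp
  | cons h t ih =>
    by_cases hp : p h
    · simp [hp, ih]
    · simp [hp, ih]

-- the guarded sums vanish when the grid is empty (n ≤ 0 or m ≤ 0)
theorem pv_lhs_zero (n m : Int) (hnm : n ≤ 0 ∨ m ≤ 0) (A B D : Int → Int) (l : List Int) :
    (l.map (fun k => if 1 ≤ A k ∧ A k ≤ n ∧ 1 ≤ B k ∧ B k ≤ m then D k else 0)).sum = 0 := by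
  apply List.sum_eq_zero
  intro x hx
  obtain ⟨k, _, hk⟩ := List.mem_map.mp hx
  rw [← hk, if_neg]
  rintro ⟨h1, h2, h3, h4⟩
  omega

theorem pv_rhs_zero (n m : Int) (hnm : n ≤ 0 ∨ m ≤ 0) (l : List (Int × Int × Int)) :
    (l.map (fun t => if decide (1 ≤ t.1 ∧ t.1 ≤ n ∧ 1 ≤ t.2.1 ∧ t.2.1 ≤ m) = true
        then t.2.2 else 0)).sum = 0 := by
  apply List.sum_eq_zero
  intro x hx
  obtain ⟨t, _, ht⟩ := List.mem_map.mp hx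
  rw [← ht, if_neg]
  intro hdec
  obtain ⟨h1, h2, h3, h4⟩ := of_decide_eq_true hdec
  omega

-- the zip of the three taken tails, elementwise, when all lists are long enough
theorem pv_zip_triple (xs ys zs : List Int) (Q : Nat)
    (hx : Q + 1 ≤ xs.length) (hy : Q + 1 ≤ ys.length) (hz : Q + 1 ≤ zs.length) :
    ((xs.drop 1).take Q).zip (((ys.drop 1).take Q).zip ((zs.drop 1).take Q))
      = (List.range Q).map (fun k => (xs.getD (1+k) 0, (ys.getD (1+k) 0, zs.getD (1+k) 0))) := by
  apply List.ext_getElem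
  · simp [List.length_zip, List.length_take]
    omega
  · intro i h1 h2
    have hiQ : i < Q := by
      simpa [List.length_range] using h2
    simp only [List.getElem_zip, List.getElem_take, List.getElem_drop,
      List.getElem_map, List.getElem_range]
    have gx : xs.getD (1+i) 0 = xs[1+i]'(by omega) := List.getD_eq_getElem xs 0 (by omega)
    have gy : ys.getD (1+i) 0 = ys[1+i]'(by omega) := List.getD_eq_getElem ys 0 (by omega)
    have gz : zs.getD (1+i) 0 = zs[1+i]'(by omega) := List.getD_eq_getElem zs 0 (by omega)
    rw [gx, gy, gz]

-- ===== VERDICT (by name: the statement is the Claim_ definition above) =====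
theorem get_score_spec : Claim_equal_get_score := by
  intro n m q a b c d _ hpre
  unfold Spec_get_score get_score_alt
  rw [pv_A_eq_sum, pv_sum_filter_map]
  by_cases hq : 1 ≤ q
  · by_cases hn : 1 ≤ n
    · by_cases hm : 1 ≤ m
      · -- main case: lists are long enough
        obtain ⟨ha, hb, hd⟩ := hpre ⟨hq, hn, hm⟩
        have hk : max q 0 = q := by omega
        have hs : ∀ xs : List Int,
            PySem.List.slice xs (some 1) (some (q+1)) = (xs.drop 1).take q.toNat := by
          intro xs
          rw [PySem.List.slice_toNat xs (by omega) (by omega)]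
          congr 1
          omega
        rw [hk, hs a, hs b, hs d,
          pv_zip_triple a b d q.toNat (by omega) (by omega) (by omega),
          PySem.List.pyRange_one, add_sub_cancel_right, List.map_map, List.map_map]
        apply congrArg List.sum
        apply List.map_congr_left
        intro k hk'
        have hkQ : k < q.toNat := List.mem_range.mp hk'
        have hg : ∀ xs : List Int,
            PySem.List.pyGetD xs (1 + (k : Int)) 0 = xs.getD (1+k) 0 := by
          intro xs
          rw [PySem.List.pyGetD_of_nonneg xs 0 (by omega),
            show ((1:Int) + (k:Int)).toNat = 1 + k by omega]
        simp only [Function.comp, hg, decide_eq_true_eq]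
      · -- m ≤ 0 : both sides sum only zeros
        exact Eq.trans (pv_lhs_zero n m (Or.inr (by omega)) _ _ _ _)
          (pv_rhs_zero n m (Or.inr (by omega)) _).symm
    · -- n ≤ 0 : both sides sum only zeros
      exact Eq.trans (pv_lhs_zero n m (Or.inl (by omega)) _ _ _ _)
        (pv_rhs_zero n m (Or.inl (by omega)) _).symm
  · -- q ≤ 0 : the range and the slices are all empty
    have hk : max q 0 = 0 := by omega
    have hs : ∀ xs : List Int, PySem.List.slice xs (some 1) (some ((0:Int)+1)) = [] := by
      intro xs
      rw [PySem.List.slice_toNat xs (by omega) (by omega)]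
      simp
    rw [PySem.List.pyRange_one_eq_nil (by omega), hk, hs a, hs b, hs d]
    simp
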